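-- pv_equiv track=rewrite | github.com/jacubthomas/leetcode | Interview_Questions/fb_rotaryLock1.py | findAllCounterPoints
-- ===== SOURCE A (Python) =====
-- from typing import List
-- import math
--
-- def findAllCounterPoints(N: int, M: int, C: List[int], isEven: bool):
--     # Store our counterpoint key in here
--     # Counterpoints will help us determine the optimal route
--     counterPointList = [-1 for x in range(0, N+1)]
--     if isEven:
--         for digit in range(1, math.floor(N/2) + 1):
--             digitCounterPoint = digit + math.floor(N/2)
--             counterPointList[digit] = digitCounterPoint
--             counterPointList[digitCounterPoint] = digit
--     else:
--         for digit in range(1, math.ceil(N/2) + 1):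
--             digitCounterPoint = digit + math.floor(N/2)
--             counterPointList[digit] = digitCounterPoint
--             counterPointList[digitCounterPoint] = digit
--     return counterPointList
-- ===== SOURCE B (Python) =====
-- def findAllCounterPoints(N, M, C, isEven):
--     # Closed-form per index: one pass instead of the pairing loop.
--     h = N // 2
--     L = h if isEven else (N + 1) // 2  # loop bound of A (floor vs ceil of N/2)
--     return [i + h if 1 <= i <= L else (i - h if L < i <= L + h else -1)
--             for i in range(N + 1)]
-- ===== Notes on version B (the rewrite author's own statement) =====
-- stated objective: simpler
-- what changed: Replaces the two mutating pairing loops (each writing two entries per iteration, with a last-write-wins overwrite in the odd case) by a single closed-form comprehension computing each position directly.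
import Mathlib
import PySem

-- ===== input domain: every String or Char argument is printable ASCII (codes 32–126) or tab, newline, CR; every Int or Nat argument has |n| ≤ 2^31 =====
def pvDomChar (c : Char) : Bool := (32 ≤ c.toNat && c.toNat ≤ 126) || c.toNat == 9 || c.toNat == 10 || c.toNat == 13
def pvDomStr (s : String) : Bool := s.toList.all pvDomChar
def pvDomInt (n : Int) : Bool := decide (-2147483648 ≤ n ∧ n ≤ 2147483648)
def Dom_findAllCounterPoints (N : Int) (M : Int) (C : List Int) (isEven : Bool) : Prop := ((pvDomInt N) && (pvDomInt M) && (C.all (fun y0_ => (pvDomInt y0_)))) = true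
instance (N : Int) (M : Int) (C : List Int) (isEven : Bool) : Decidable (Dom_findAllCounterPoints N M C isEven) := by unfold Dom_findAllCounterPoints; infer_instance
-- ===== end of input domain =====

-- B replaces A's two mutating pairing loops by one closed-form comprehension (simpler decomposition, same O(N) cost).

-- ===== PORT A =====
-- math.ceil(N/2): on |N| ≤ 2^31 the float N/2 is exact, so math.ceil(N/2) = -((-N) // 2); ported as that integer ceiling.
def pvCeilHalf (N : Int) : Int := -(PySem.Int.floordiv (-N) 2)

-- Python's 'counterPointList[i] = v' is pySetD: exact here since every written index is in range (0 ≤ i ≤ N) whenever the loop runs.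
def findAllCounterPoints (N : Int) (M : Int) (C : List Int) (isEven : Bool) : List Int :=
  let counterPointList := (PySem.List.pyRange 0 (N+1) 1).map (fun _ => (-1 : Int))
  if isEven then
    (PySem.List.pyRange 1 (PySem.Int.floordiv N 2 + 1) 1).foldl
      (fun l digit =>
        let digitCounterPoint := digit + PySem.Int.floordiv N 2
        PySem.List.pySetD (PySem.List.pySetD l digit digitCounterPoint) digitCounterPoint digit)
      counterPointList
  else
    (PySem.List.pyRange 1 (pvCeilHalf N + 1) 1).foldl
      (fun l digit =>
        let digitCounterPoint := digit + PySem.Int.floordiv N 2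
        PySem.List.pySetD (PySem.List.pySetD l digit digitCounterPoint) digitCounterPoint digit)
      counterPointList

-- ===== PORT B =====
def findAllCounterPoints_alt (N : Int) (M : Int) (C : List Int) (isEven : Bool) : List Int :=
  let h := PySem.Int.floordiv N 2
  let L := if isEven then h else PySem.Int.floordiv (N + 1) 2
  (PySem.List.pyRange 0 (N + 1) 1).map (fun i =>
    if 1 ≤ i ∧ i ≤ L then i + h else if L < i ∧ i ≤ L + h then i - h else -1)

-- ===== PRECONDITION & SPEC =====
def Spec_findAllCounterPoints (N : Int) (M : Int) (C : List Int) (isEven : Bool) (out : List Int) : Prop := out = findAllCounterPoints_alt N M C isEven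
instance (N : Int) (M : Int) (C : List Int) (isEven : Bool) (out : List Int) : Decidable (Spec_findAllCounterPoints N M C isEven out) := by unfold Spec_findAllCounterPoints; infer_instance

-- ===== CLAIM (what is proved, stated in full; the proofs are below) =====
def Claim_equal_findAllCounterPoints : Prop := ∀ (N : Int) (M : Int) (C : List Int) (isEven : Bool), Dom_findAllCounterPoints N M C isEven → Spec_findAllCounterPoints N M C isEven (findAllCounterPoints N M C isEven)

-- ===== LEMMAS AND PROOFS =====

lemma pvCeilHalf_eq (N : Int) : pvCeilHalf N = PySem.Int.floordiv (N + 1) 2 := by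
  unfold pvCeilHalf
  rw [PySem.Int.floordiv_eq_ediv_of_pos (by norm_num), PySem.Int.floordiv_eq_ediv_of_pos (by norm_num)]
  omega

-- writing one in-range index of a mapped range refreshes the map pointwise
lemma pvSetD_map_pyRange (N : Int) (f : Int → Int) (j v : Int) (h0 : 0 ≤ j) (_hj : j ≤ N) :
    PySem.List.pySetD ((PySem.List.pyRange 0 (N+1) 1).map f) j v
      = (PySem.List.pyRange 0 (N+1) 1).map (fun i => if i = j then v else f i) := by
  rw [PySem.List.pySetD_of_nonneg _ _ h0, PySem.List.pyRange_one]
  apply List.ext_getElem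
  · simp
  · intro k hk1 hk2
    simp only [List.length_set, List.length_map, List.length_range] at hk1
    simp only [List.getElem_set, List.getElem_map, List.getElem_range, zero_add]
    rcases eq_or_ne ((k : Int)) j with hkj | hkj
    · have h' : j.toNat = k := by omega
      simp [h', hkj]
    · have h' : j.toNat ≠ k := by omega
      simp [h', hkj]

-- invariant of A's pairing loop: after digits 1..d every position holds its closed-form value
lemma pvLoop_char (N h : Int) (hh : 0 ≤ h) (d : Int) (hd0 : 0 ≤ d) (hdN : d + h ≤ N) :
    (PySem.List.pyRange 1 (d + 1) 1).foldl
      (fun l digit =>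
        let digitCounterPoint := digit + h
        PySem.List.pySetD (PySem.List.pySetD l digit digitCounterPoint) digitCounterPoint digit)
      ((PySem.List.pyRange 0 (N+1) 1).map (fun _ => (-1 : Int)))
    = (PySem.List.pyRange 0 (N+1) 1).map
        (fun i => if 1 ≤ i ∧ i ≤ d then i + h else if h + 1 ≤ i ∧ i ≤ d + h then i - h else -1) := by
  induction d, hd0 using Int.le_induction with
  | base =>
      rw [show PySem.List.pyRange 1 (0 + 1) 1 = [] from PySem.List.pyRange_one_eq_nil (by omega)]
      simp only [List.foldl_nil]
      apply List.map_congr_left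
      intro i _
      have h1 : ¬ (1 ≤ i ∧ i ≤ 0) := by omega
      have h2 : ¬ (h + 1 ≤ i ∧ i ≤ 0 + h) := by omega
      simp only [h1, h2, if_false]
  | succ d hd ih =>
      rw [show PySem.List.pyRange 1 (d + 1 + 1) 1 = PySem.List.pyRange 1 (d + 1) 1 ++ [d + 1] from
            PySem.List.pyRange_one_succ_right (by omega),
          List.foldl_append, ih (by omega)]
      simp only [List.foldl_cons, List.foldl_nil]
      rw [pvSetD_map_pyRange N _ (d+1) _ (by omega) (by omega),
          pvSetD_map_pyRange N _ (d+1+h) _ (by omega) (by omega)]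
      apply List.map_congr_left
      intro i hi
      rw [PySem.List.mem_pyRange_one] at hi
      split_ifs <;> omega

lemma pvFloordiv2 (a : Int) : PySem.Int.floordiv a 2 = a / 2 :=
  PySem.Int.floordiv_eq_ediv_of_pos (by norm_num)

-- pointwise agreement of A's invariant shape with B's closed form, for L ≥ h ≥ 0
lemma pvShapes_eq (N h L : Int) (hh : 0 ≤ h) (hL : h ≤ L) :
    (PySem.List.pyRange 0 (N+1) 1).map
        (fun i => if 1 ≤ i ∧ i ≤ L then i + h else if h + 1 ≤ i ∧ i ≤ L + h then i - h else -1)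
      = (PySem.List.pyRange 0 (N+1) 1).map
        (fun i => if 1 ≤ i ∧ i ≤ L then i + h else if L < i ∧ i ≤ L + h then i - h else -1) := by
  apply List.map_congr_left
  intro i _
  split_ifs <;> omega

lemma pvNeg_case (N : Int) (hN : N < 0) (M : Int) (C : List Int) (isEven : Bool) :
    findAllCounterPoints N M C isEven = findAllCounterPoints_alt N M C isEven := by
  unfold findAllCounterPoints findAllCounterPoints_alt
  have hnil : PySem.List.pyRange 0 (N+1) 1 = [] := PySem.List.pyRange_one_eq_nil (by omega)
  have h1 : PySem.List.pyRange 1 (PySem.Int.floordiv N 2 + 1) 1 = [] := by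
    apply PySem.List.pyRange_one_eq_nil
    rw [pvFloordiv2]; omega
  have h2 : PySem.List.pyRange 1 (pvCeilHalf N + 1) 1 = [] := by
    apply PySem.List.pyRange_one_eq_nil
    rw [pvCeilHalf_eq, pvFloordiv2]; omega
  cases isEven <;>
    simp only [Bool.false_eq_true, if_false, if_true, hnil, h1, h2, List.foldl_nil, List.map_nil]

-- ===== VERDICT (by name: the statement is the Claim_ definition above) =====
theorem findAllCounterPoints_spec : Claim_equal_findAllCounterPoints := by
  intro N M C isEven _
  unfold Spec_findAllCounterPoints
  by_cases hN : N < 0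
  · exact pvNeg_case N hN M C isEven
  have hN' : 0 ≤ N := by omega
  unfold findAllCounterPoints findAllCounterPoints_alt
  have hh : 0 ≤ PySem.Int.floordiv N 2 := by rw [pvFloordiv2]; omega
  cases isEven
  · -- odd branch: loop bound is ceil(N/2)
    simp only [Bool.false_eq_true, if_false]
    rw [pvCeilHalf_eq]
    rw [pvLoop_char N (PySem.Int.floordiv N 2) hh (PySem.Int.floordiv (N+1) 2)
          (by rw [pvFloordiv2]; omega) (by rw [pvFloordiv2, pvFloordiv2]; omega)]
    rw [pvShapes_eq N _ _ hh (by rw [pvFloordiv2, pvFloordiv2]; omega)]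
  · -- even branch: loop bound is floor(N/2)
    simp only [if_true]
    rw [pvLoop_char N (PySem.Int.floordiv N 2) hh (PySem.Int.floordiv N 2) hh
          (by rw [pvFloordiv2]; omega)]
    rw [pvShapes_eq N _ _ hh le_rfl]
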